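-- pv_equiv track=rewrite | github.com/Zimo05/CSC3100-Data-Strcuture | Assignment/Ass1/Question1/Q1(4).py | check
-- ===== SOURCE A (Python) =====
-- def check(se, dna):
--     dic = {}
--     reverse_dic = {}
--
--     for i in range(len(dna)):
--
--         if dna[i] in dic:
--             if dic[dna[i]] != se[i]:
--                 return False
--         else:
--             dic[dna[i]] = se[i]
--
--         if se[i] in reverse_dic:
--             if reverse_dic[se[i]] != dna[i]:
--                 return False
--         else:
--             reverse_dic[se[i]] = dna[i]
--
--     return True
-- ===== SOURCE B (Python) =====
-- def check(se, dna):
--     pairs = set(zip(dna, se))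
--     return len(pairs) == len({a for a, _ in pairs}) == len({b for _, b in pairs})
-- ===== Notes on version B (the rewrite author's own statement) =====
-- stated objective: idiomatic
-- what changed: Replaces the two-dictionary forward/backward consistency scan with early exit by the standard cardinality bijection test: build the set of (dna[i], se[i]) pairs via zip and compare |pairs|, |keys| and |values| (the set/zip work happens in C rather than per-char interpreted dict branching).
import Mathlib
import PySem

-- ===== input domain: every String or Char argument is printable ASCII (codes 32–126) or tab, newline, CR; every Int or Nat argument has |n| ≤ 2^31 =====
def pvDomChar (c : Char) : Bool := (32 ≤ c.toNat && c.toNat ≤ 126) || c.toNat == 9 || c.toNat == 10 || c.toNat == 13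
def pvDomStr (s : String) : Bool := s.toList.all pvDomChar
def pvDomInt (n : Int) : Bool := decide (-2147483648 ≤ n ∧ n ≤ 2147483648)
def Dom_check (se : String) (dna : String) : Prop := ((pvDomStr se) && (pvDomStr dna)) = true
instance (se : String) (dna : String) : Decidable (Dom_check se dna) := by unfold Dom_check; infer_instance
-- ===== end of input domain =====

-- B replaces A's two-dictionary consistency scan by the idiomatic cardinality bijection test
-- (|set of pairs| = |set of keys| = |set of values|); equivalence is about the RETURN value (neither mutates).

-- ===== PORT A =====
-- A's loop 'for i in range(len(dna))' reads dna[i] and se[i]; on every input admitted by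
-- Pre_check the pairs it visits before returning are exactly (a prefix of) dna.toList.zip se.toList,
-- so the loop is ported as a recursion over that zip list carrying A's two dicts, branches in A's order.
def checkGo : List (Char × Char) → PySem.Dict Char Char → PySem.Dict Char Char → Bool
  | [], _, _ => true
  | (a, b) :: rest, dic, rdic =>
    match dic.get? a with
    | some v =>
      if v ≠ b then false
      else
        match rdic.get? b with
        | some w => if w ≠ a then false else checkGo rest dic rdic
        | none => checkGo rest dic (rdic.insert b a)
    | none =>
      let dic' := dic.insert a b
      match rdic.get? b with
      | some w => if w ≠ a then false else checkGo rest dic' rdic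
      | none => checkGo rest dic' (rdic.insert b a)

def check (se : String) (dna : String) : Bool :=
  checkGo (dna.toList.zip se.toList) PySem.Dict.empty PySem.Dict.empty

-- ===== PORT B =====
def check_alt (se : String) (dna : String) : Bool :=
  let pairs : PySem.Set (Char × Char) := PySem.Set.ofList (dna.toList.zip se.toList)
  let keys : PySem.Set Char := PySem.Set.ofList (pairs.map Prod.fst)
  let vals : PySem.Set Char := PySem.Set.ofList (pairs.map Prod.snd)
  PySem.Set.len pairs == PySem.Set.len keys && PySem.Set.len keys == PySem.Set.len vals

-- ===== PRECONDITION & SPEC =====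
-- pairwise consistency of a pair list (spec-level, used only to state Pre_/Raises_)
def pvConsistent (l : List (Char × Char)) : Bool :=
  l.all (fun p => l.all (fun q => (p.1 == q.1) == (p.2 == q.2)))

-- A raises IndexError exactly when se is shorter than dna and the zipped pairs are pairwise
-- consistent (otherwise it returns False before reaching the missing index); Pre_ excludes exactly those inputs.
def Pre_check (se : String) (dna : String) : Prop :=
  se.toList.length < dna.toList.length → pvConsistent (dna.toList.zip se.toList) = false
instance (se : String) (dna : String) : Decidable (Pre_check se dna) := by
  unfold Pre_check; infer_instance

def pvWitness_check : String × String := ("ab", "ab")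

def Spec_check (se : String) (dna : String) (out : Bool) : Prop := out = check_alt se dna
instance (se : String) (dna : String) (out : Bool) : Decidable (Spec_check se dna out) := by
  unfold Spec_check; infer_instance

-- ===== CLAIM (what is proved, stated in full; the proofs are below) =====
def Claim_equal_check : Prop :=
  ∀ (se : String) (dna : String), Dom_check se dna → Pre_check se dna → Spec_check se dna (check se dna)

-- ===== LEMMAS AND PROOFS =====

-- the specification both ports compute: any two visited pairs agree on keys iff they agree on values
def GoodP (l : List (Char × Char)) : Prop := ∀ p ∈ l, ∀ q ∈ l, (p.1 = q.1 ↔ p.2 = q.2)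

theorem goodP_congr {l l' : List (Char × Char)} (h : ∀ y, y ∈ l ↔ y ∈ l') :
    GoodP l ↔ GoodP l' := by
  unfold GoodP
  constructor <;> intro hg p hp q hq
  · exact hg p ((h p).mpr hp) q ((h q).mpr hq)
  · exact hg p ((h p).mp hp) q ((h q).mp hq)

-- A-side loop invariant: with dic/rdic the forward and backward maps of an already-consistent
-- pair set P, checkGo decides consistency of P ++ l.
theorem checkGo_iff (l : List (Char × Char)) :
    ∀ (P : List (Char × Char)) (dic rdic : PySem.Dict Char Char),
    (∀ a b, dic.get? a = some b ↔ (a, b) ∈ P) →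
    (∀ a b, rdic.get? b = some a ↔ (a, b) ∈ P) →
    GoodP P →
    (checkGo l dic rdic = true ↔ GoodP (P ++ l)) := by
  induction l with
  | nil =>
    intro P dic rdic _ _ hP
    simpa [checkGo] using hP
  | cons hd rest ih =>
    intro P dic rdic hdic hrdic hP
    obtain ⟨a, b⟩ := hd
    have hmem_a : (a, b) ∈ P ++ (a, b) :: rest := by simp
    cases hda : dic.get? a with
    | some v =>
      have hvP : (a, v) ∈ P := (hdic a v).mp hda
      by_cases hvb : v = b
      · rw [hvb] at hvP hda
        have hrb : rdic.get? b = some a := (hrdic a b).mpr hvP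
        have hmem : ∀ y, y ∈ P ++ (a, b) :: rest ↔ y ∈ P ++ rest := by
          intro y
          simp only [List.mem_append, List.mem_cons]
          constructor
          · rintro (h | h | h)
            · exact Or.inl h
            · exact Or.inl (h ▸ hvP)
            · exact Or.inr h
          · rintro (h | h)
            · exact Or.inl h
            · exact Or.inr (Or.inr h)
        rw [goodP_congr hmem, ← ih P dic rdic hdic hrdic hP]
        simp [checkGo, hda, hrb]
      · have hfalse : checkGo ((a, b) :: rest) dic rdic = false := by
          simp [checkGo, hda, hvb]
        rw [hfalse]
        simp only [Bool.false_eq_true, false_iff]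
        intro hg
        exact hvb ((hg (a, v) (List.mem_append_left _ hvP) (a, b) hmem_a).mp rfl)
    | none =>
      have hfresh_a : ∀ b', (a, b') ∉ P := by
        intro b' hmem
        have h := (hdic a b').mpr hmem
        rw [hda] at h; simp at h
      cases hrb : rdic.get? b with
      | some w =>
        have hwP : (w, b) ∈ P := (hrdic w b).mp hrb
        have hwa : w ≠ a := fun h => hfresh_a b (h ▸ hwP)
        have hfalse : checkGo ((a, b) :: rest) dic rdic = false := by
          simp [checkGo, hda, hrb, hwa]
        rw [hfalse]
        simp only [Bool.false_eq_true, false_iff]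
        intro hg
        exact hwa ((hg (w, b) (List.mem_append_left _ hwP) (a, b) hmem_a).mpr rfl)
      | none =>
        have hfresh_b : ∀ a', (a', b) ∉ P := by
          intro a' hmem
          have h := (hrdic a' b).mpr hmem
          rw [hrb] at h; simp at h
        -- both fresh: insert into both dicts, P grows by (a, b)
        have hdic' : ∀ x y, (dic.insert a b).get? x = some y ↔ (x, y) ∈ P ++ [(a, b)] := by
          intro x y
          rw [PySem.Dict.get?_insert]
          by_cases hx : x = a
          · subst hx
            rw [if_pos rfl]
            simp only [List.mem_append, List.mem_singleton]
            constructor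
            · intro h; injection h with h; exact Or.inr (by rw [← h])
            · rintro (h | h)
              · exact absurd h (hfresh_a y)
              · injection h with _ h; rw [h]
          · rw [if_neg hx]
            simp only [List.mem_append, List.mem_singleton, hdic x y]
            constructor
            · exact Or.inl
            · rintro (h | h)
              · exact h
              · exact absurd (congrArg Prod.fst h) hx
        have hrdic' : ∀ x y, (rdic.insert b a).get? y = some x ↔ (x, y) ∈ P ++ [(a, b)] := by
          intro x y
          rw [PySem.Dict.get?_insert]
          by_cases hy : y = b
          · subst hy
            rw [if_pos rfl]
            simp only [List.mem_append, List.mem_singleton]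
            constructor
            · intro h; injection h with h; exact Or.inr (by rw [← h])
            · rintro (h | h)
              · exact absurd h (hfresh_b x)
              · injection h with h _; rw [h]
          · rw [if_neg hy]
            simp only [List.mem_append, List.mem_singleton, hrdic x y]
            constructor
            · exact Or.inl
            · rintro (h | h)
              · exact h
              · exact absurd (congrArg Prod.snd h) hy
        have hP' : GoodP (P ++ [(a, b)]) := by
          intro p hp q hq
          simp only [List.mem_append, List.mem_singleton] at hp hq
          rcases hp with hp | hp <;> rcases hq with hq | hq
          · exact hP p hp q hq
          · subst hq
            show p.1 = a ↔ p.2 = b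
            constructor
            · intro h
              exact ((hfresh_a p.2) (show (a, p.2) ∈ P by rw [← h, Prod.mk.eta]; exact hp)).elim
            · intro h
              exact ((hfresh_b p.1) (show (p.1, b) ∈ P by rw [← h, Prod.mk.eta]; exact hp)).elim
          · subst hp
            show a = q.1 ↔ b = q.2
            constructor
            · intro h
              exact ((hfresh_a q.2) (show (a, q.2) ∈ P by rw [h, Prod.mk.eta]; exact hq)).elim
            · intro h
              exact ((hfresh_b q.1) (show (q.1, b) ∈ P by rw [h, Prod.mk.eta]; exact hq)).elim
          · subst hp; subst hq; simp
        have hrec := ih (P ++ [(a, b)]) (dic.insert a b) (rdic.insert b a) hdic' hrdic' hP'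
        rw [List.append_assoc] at hrec
        simp only [List.singleton_append] at hrec
        rw [← hrec]
        simp [checkGo, hda, hrb]

theorem check_iff_goodP (se dna : String) :
    check se dna = true ↔ GoodP (dna.toList.zip se.toList) := by
  have h := checkGo_iff (dna.toList.zip se.toList) [] PySem.Dict.empty PySem.Dict.empty
    (by intro a b; simp [PySem.Dict.get?_empty])
    (by intro a b; simp [PySem.Dict.get?_empty])
    (by intro p hp; simp at hp)
  simpa [check] using h

-- B-side: cardinality facts via Finset
theorem pvSet_toFinset {α : Type} [DecidableEq α] [BEq α] [LawfulBEq α] (l : List α) :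
    (PySem.Set.ofList l : List α).toFinset = l.toFinset := by
  ext x
  rw [← PySem.List.dedup_eq_ofList]
  simp

theorem len_ofList_eq_card {α : Type} [DecidableEq α] [BEq α] [LawfulBEq α] (l : List α) :
    (PySem.Set.ofList l : List α).length = l.toFinset.card := by
  rw [← List.toFinset_card_of_nodup
    (by rw [← PySem.List.dedup_eq_ofList]; exact PySem.List.nodup_dedup l)]
  rw [pvSet_toFinset]

theorem card_iff_goodP (l : List (Char × Char)) :
    (l.toFinset.card = (Finset.image Prod.fst l.toFinset).card ∧
     (Finset.image Prod.fst l.toFinset).card = (Finset.image Prod.snd l.toFinset).card) ↔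
    GoodP l := by
  constructor
  · rintro ⟨h12, h23⟩
    have hf : Set.InjOn Prod.fst (l.toFinset : Set (Char × Char)) :=
      Finset.card_image_iff.mp h12.symm
    have hs : Set.InjOn Prod.snd (l.toFinset : Set (Char × Char)) :=
      Finset.card_image_iff.mp (h23.symm.trans h12.symm)
    intro p hp q hq
    have hp' : p ∈ l.toFinset := List.mem_toFinset.mpr hp
    have hq' : q ∈ l.toFinset := List.mem_toFinset.mpr hq
    constructor
    · intro h
      exact congrArg Prod.snd (hf (Finset.mem_coe.mpr hp') (Finset.mem_coe.mpr hq') h)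
    · intro h
      exact congrArg Prod.fst (hs (Finset.mem_coe.mpr hp') (Finset.mem_coe.mpr hq') h)
  · intro hg
    have hf : Set.InjOn Prod.fst (l.toFinset : Set (Char × Char)) := by
      intro p hp q hq h
      simp only [Finset.mem_coe, List.mem_toFinset] at hp hq
      exact Prod.ext_iff.mpr ⟨h, (hg p hp q hq).mp h⟩
    have hs : Set.InjOn Prod.snd (l.toFinset : Set (Char × Char)) := by
      intro p hp q hq h
      simp only [Finset.mem_coe, List.mem_toFinset] at hp hq
      exact Prod.ext_iff.mpr ⟨(hg p hp q hq).mpr h, h⟩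
    exact ⟨(Finset.card_image_iff.mpr hf).symm,
      (Finset.card_image_iff.mpr hf).trans (Finset.card_image_iff.mpr hs).symm⟩

theorem check_alt_iff_goodP (se dna : String) :
    check_alt se dna = true ↔ GoodP (dna.toList.zip se.toList) := by
  have h1 : (PySem.Set.ofList (dna.toList.zip se.toList) : List (Char × Char)).length
      = (dna.toList.zip se.toList).toFinset.card := len_ofList_eq_card _
  have hkeys : ((PySem.Set.ofList (dna.toList.zip se.toList) : List (Char × Char)).map
        Prod.fst).toFinset = Finset.image Prod.fst (dna.toList.zip se.toList).toFinset := by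
    ext x
    rw [show ((PySem.Set.ofList (dna.toList.zip se.toList) :
        List (Char × Char)).map Prod.fst).toFinset
      = Finset.image Prod.fst (PySem.Set.ofList (dna.toList.zip se.toList) :
        List (Char × Char)).toFinset from by ext y; simp]
    rw [pvSet_toFinset]
  have hvals : ((PySem.Set.ofList (dna.toList.zip se.toList) : List (Char × Char)).map
        Prod.snd).toFinset = Finset.image Prod.snd (dna.toList.zip se.toList).toFinset := by
    ext x
    rw [show ((PySem.Set.ofList (dna.toList.zip se.toList) :
        List (Char × Char)).map Prod.snd).toFinset
      = Finset.image Prod.snd (PySem.Set.ofList (dna.toList.zip se.toList) :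
        List (Char × Char)).toFinset from by ext y; simp]
    rw [pvSet_toFinset]
  have h2 : (PySem.Set.ofList ((PySem.Set.ofList (dna.toList.zip se.toList) :
      List (Char × Char)).map Prod.fst) : List Char).length
      = (Finset.image Prod.fst (dna.toList.zip se.toList).toFinset).card := by
    rw [len_ofList_eq_card, hkeys]
  have h3 : (PySem.Set.ofList ((PySem.Set.ofList (dna.toList.zip se.toList) :
      List (Char × Char)).map Prod.snd) : List Char).length
      = (Finset.image Prod.snd (dna.toList.zip se.toList).toFinset).card := by
    rw [len_ofList_eq_card, hvals]
  rw [← card_iff_goodP]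
  simp only [check_alt, PySem.Set.len]
  rw [h1, h2, h3]
  simp [Nat.cast_inj]

-- ===== VERDICT (by name: the statement is the Claim_ definition above) =====
theorem check_spec : Claim_equal_check := by
  intro se dna _ _
  unfold Spec_check
  have h := (check_iff_goodP se dna).trans (check_alt_iff_goodP se dna).symm
  cases hca : check se dna <;> cases hcb : check_alt se dna <;>
    rw [hca, hcb] at h <;> simp_all
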